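-- pv_equiv track=rewrite | github.com/XiyunYue/computational_lab | assignment2/min_w.py | wmin
-- ===== SOURCE A (Python) =====
-- def wmin(b_k):
--     click_max = 0
--     click_sum = 0
--     for i in b_k:
--         if i != 0:
--             click_sum += 1
--             if click_sum > click_max:
--                 click_max = click_sum
--         else:
--             click_sum = 0
--     w_mini = click_max * 2 + 1
--     return w_mini
-- ===== SOURCE B (Python) =====
-- def wmin(b_k):
--     # build the list of lengths of maximal nonzero runs, then reduce with max
--     lengths = []
--     i, n = 0, len(b_k)
--     while i < n:
--         if b_k[i] == 0:
--             i += 1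
--         else:
--             j = i
--             while j < n and b_k[j] != 0:
--                 j += 1
--             lengths.append(j - i)
--             i = j
--     return 2 * max(lengths, default=0) + 1
-- ===== Notes on version B (the rewrite author's own statement) =====
-- stated objective: alternative
-- what changed: Replaces the running-max/reset accumulator with a two-phase shape: scan out the maximal nonzero runs (two-pointer run extraction), collect their lengths, then take max(lengths, default=0) and return 2*max+1.
import Mathlib
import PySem

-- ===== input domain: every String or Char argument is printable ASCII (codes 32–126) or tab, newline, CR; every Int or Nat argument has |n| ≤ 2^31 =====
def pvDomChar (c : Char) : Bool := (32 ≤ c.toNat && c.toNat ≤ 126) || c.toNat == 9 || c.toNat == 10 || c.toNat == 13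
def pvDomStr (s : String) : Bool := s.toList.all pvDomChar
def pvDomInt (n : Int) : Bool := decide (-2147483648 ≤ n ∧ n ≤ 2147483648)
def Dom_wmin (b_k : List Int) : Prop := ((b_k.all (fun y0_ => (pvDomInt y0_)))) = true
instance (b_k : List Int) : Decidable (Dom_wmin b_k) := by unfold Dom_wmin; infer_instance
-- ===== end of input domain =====

-- B replaces A's running-max/reset accumulator with run extraction + max over run lengths (alternative decomposition, same cost).


-- ===== PORT A =====
-- A's loop body (if i != 0: click_sum += 1; if click_sum > click_max: click_max = click_sum; else: click_sum = 0)
def wminStep (p : Int × Int) (i : Int) : Int × Int :=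
  if i ≠ 0 then
    let cs := p.2 + 1
    (if cs > p.1 then cs else p.1, cs)
  else (p.1, 0)

def wmin (b_k : List Int) : Int :=
  let st := b_k.foldl wminStep (0, 0)
  st.1 * 2 + 1

-- ===== PORT B =====
-- run extraction: the length of each maximal nonzero run, in order (B's while-loop over the input)
def wminRunLens : List Int → List Int
  | [] => []
  | x :: xs =>
    if x = 0 then wminRunLens xs
    else (1 + ((xs.takeWhile (fun y => y != 0)).length : Int)) ::
           wminRunLens (xs.dropWhile (fun y => y != 0))
termination_by l => l.length
decreasing_by
  · simp
  · simp only [List.length_cons]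
    exact Nat.lt_succ_of_le (List.length_dropWhile_le _ _)

def wmin_alt (b_k : List Int) : Int :=
  2 * ((PySem.List.max? (wminRunLens b_k) (fun y => y)).getD 0) + 1

-- ===== PRECONDITION & SPEC =====
def Spec_wmin (b_k : List Int) (out : Int) : Prop := out = wmin_alt b_k
instance (b_k : List Int) (out : Int) : Decidable (Spec_wmin b_k out) := by unfold Spec_wmin; infer_instance

-- ===== CLAIM (what is proved, stated in full; the proofs are below) =====
def Claim_equal_wmin : Prop := ∀ (b_k : List Int), Dom_wmin b_k → Spec_wmin b_k (wmin b_k)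

-- ===== LEMMAS AND PROOFS =====

-- the mathematical "longest nonzero run, given current run credit s"
def wminG : List Int → Int → Int
  | [], s => s
  | x :: l, s => if x = 0 then max s (wminG l 0) else wminG l (s + 1)

theorem wminStep_zero (p : Int × Int) : wminStep p 0 = (p.1, 0) := by
  simp [wminStep]

theorem wminStep_ne (p : Int × Int) (x : Int) (hx : x ≠ 0) :
    wminStep p x = (max p.1 (p.2 + 1), p.2 + 1) := by
  simp only [wminStep, if_pos hx]
  rw [max_def]
  split_ifs <;> simp_all <;> omega

theorem wminG_ge (l : List Int) : ∀ s : Int, s ≤ wminG l s := by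
  induction l with
  | nil => intro s; simp [wminG]
  | cons x t ih =>
    intro s
    by_cases hx : x = 0
    · simp [wminG, hx]
    · simpa [wminG, hx] using le_trans (by omega) (ih (s + 1))

theorem wmin_fold (l : List Int) : ∀ m s : Int, 0 ≤ s → s ≤ m →
    (l.foldl wminStep (m, s)).1 = max m (wminG l s) := by
  induction l with
  | nil =>
    intro m s _ hsm
    simp [wminG, max_eq_left hsm]
  | cons x t ih =>
    intro m s hs hsm
    by_cases hx : x = 0
    · rw [List.foldl_cons, hx, wminStep_zero, ih m 0 le_rfl (le_trans hs hsm)]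
      have h0 : wminG (0 :: t) s = max s (wminG t 0) := by simp [wminG]
      rw [h0, ← max_assoc, max_eq_left hsm]
    · rw [List.foldl_cons, wminStep_ne _ _ hx,
        ih (max (m, s).1 ((m, s).2 + 1)) (s + 1) (by omega) (le_max_right _ _)]
      simp only [wminG, if_neg hx]
      rw [max_assoc, max_eq_right (wminG_ge t (s + 1))]

theorem wminG_run (l : List Int) : ∀ s : Int, 0 ≤ s →
    wminG l s = max (s + ((l.takeWhile (fun y => y != 0)).length : Int))
                    (wminG (l.dropWhile (fun y => y != 0)) 0) := by
  induction l with
  | nil => intro s hs; simp [wminG, max_eq_left hs]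
  | cons x t ih =>
    intro s hs
    by_cases hx : x = 0
    · simp [wminG, hx, max_eq_right (wminG_ge t 0)]
    · have hb : (x != 0) = true := by simp [hx]
      rw [List.takeWhile_cons, List.dropWhile_cons]
      simp only [wminG, if_neg hx, hb, ih (s + 1) (by omega)]
      simp only [if_true, List.length_cons]
      congr 1
      push_cast
      ring

theorem wmin_foldl_max (t : List Int) : ∀ a b : Int,
    List.foldl max (max a b) t = max a (List.foldl max b t) := by
  induction t with
  | nil => intro a b; simp
  | cons c t ih =>
    intro a b
    simp only [List.foldl_cons, max_assoc, ih]

-- Python's max(l, default=0) on a cons, for a nonnegative head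
theorem wmin_ml_cons (a : Int) (rest : List Int) (ha : 0 ≤ a) :
    ((PySem.List.max? (a :: rest) (fun y => y)).getD 0)
      = max a ((PySem.List.max? rest (fun y => y)).getD 0) := by
  cases rest with
  | nil =>
    simp [PySem.List.max?, max_eq_left ha]
  | cons y t =>
    simp only [PySem.List.max?_id_cons, Option.getD_some, List.foldl_cons]
    rw [show max a y = max a (max a y) by rw [← max_assoc, max_self], wmin_foldl_max,
      wmin_foldl_max, ← max_assoc, max_self]

theorem wminG_eq_ml (l : List Int) :
    wminG l 0 = ((PySem.List.max? (wminRunLens l) (fun y => y)).getD 0) := by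
  induction l using wminRunLens.induct with
  | case1 => simp [wminG, wminRunLens, PySem.List.max?]
  | case2 xs ih =>
    have h0 : wminG (0 :: xs) 0 = max 0 (wminG xs 0) := by simp [wminG]
    have hr : wminRunLens (0 :: xs) = wminRunLens xs := by simp [wminRunLens]
    rw [h0, max_eq_right (wminG_ge xs 0), hr, ih]
  | case3 x xs hx ih =>
    have hlen : (0 : Int) ≤ 1 + ((xs.takeWhile (fun y => y != 0)).length : Int) := by positivity
    have hrl : wminRunLens (x :: xs)
        = (1 + ((xs.takeWhile (fun y => y != 0)).length : Int)) ::
            wminRunLens (xs.dropWhile (fun y => y != 0)) := by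
      rw [wminRunLens, if_neg hx]
    rw [hrl, wmin_ml_cons _ _ hlen, ← ih]
    show wminG (x :: xs) 0 = _
    rw [show wminG (x :: xs) 0 = wminG xs 1 by simp [wminG, hx], wminG_run xs 1 (by omega)]

-- ===== VERDICT (by name: the statement is the Claim_ definition above) =====
theorem wmin_spec : Claim_equal_wmin := by
  intro b_k _
  show (b_k.foldl wminStep (0, 0)).1 * 2 + 1
      = 2 * ((PySem.List.max? (wminRunLens b_k) (fun y => y)).getD 0) + 1
  rw [wmin_fold b_k 0 0 le_rfl le_rfl, max_eq_right (wminG_ge b_k 0), wminG_eq_ml]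
  ring
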